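-- pv_equiv track=rewrite | github.com/BStephen99/PepperMint | data/generate_spatial-temporal_graphs.py | _get_time_windows
-- ===== SOURCE A (Python) =====
-- def _get_time_windows(list_fts, time_span):
--     """
--     Get the time windows from the list of frame_timestamps
--     Each window is a subset of frame_timestamps where its time span is not greater than "time_span"
--
--     e.g.
--     input:
--         list_fts:    [902, 903, 904, 905, 910, 911, 912, 913, 914, 917]
--         time_span:   3
--     output:
--         twd_all:     [[902, 903, 904], [905], [910, 911, 912], [913, 914], [917]]
--     """
--
--     twd_all = []
--
--     start = end = 0
--     while end < len(list_fts):
--         while end < len(list_fts) and list_fts[end] < list_fts[start] + time_span: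
--             end += 1
--
--         twd_all.append(list_fts[start:end])
--         start = end
--
--     return twd_all
-- ===== SOURCE B (Python) =====
-- def _get_time_windows(list_fts, time_span):
--     twd_all = []
--     current = []
--     for x in list_fts:
--         if current and x < current[0] + time_span:
--             current.append(x)
--         else:
--             if current:
--                 twd_all.append(current)
--             current = [x]
--     if current:
--         twd_all.append(current)
--     return twd_all
-- ===== Notes on version B (the rewrite author's own statement) =====
-- stated objective: simpler
-- what changed: Replaced the index-based two-pointer outer/inner while loops with slicing by a single flat for-loop that accumulates the current window element by element and flushes it when the next element falls outside the window span.
import Mathlib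
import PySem

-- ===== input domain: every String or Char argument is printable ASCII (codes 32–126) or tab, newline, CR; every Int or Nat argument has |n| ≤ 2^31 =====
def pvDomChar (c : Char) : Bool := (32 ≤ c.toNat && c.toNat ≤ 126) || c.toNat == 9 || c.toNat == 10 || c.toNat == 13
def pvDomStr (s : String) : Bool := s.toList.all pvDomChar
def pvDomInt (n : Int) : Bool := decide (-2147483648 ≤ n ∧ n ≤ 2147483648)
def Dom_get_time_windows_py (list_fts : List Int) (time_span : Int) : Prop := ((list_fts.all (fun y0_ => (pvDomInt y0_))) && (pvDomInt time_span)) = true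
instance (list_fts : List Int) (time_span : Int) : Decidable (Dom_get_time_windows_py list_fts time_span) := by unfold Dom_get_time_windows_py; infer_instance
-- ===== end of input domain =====

-- B replaces A's two-pointer while loops with slicing by one flat loop accumulating the
-- current window element by element (objective: simpler; same O(n) cost).


-- ===== PORT A =====
-- inner 'while end < len and list_fts[end] < list_fts[start] + time_span: end += 1'
-- (the in-range guard precedes the access, so getD 0 is exact where it is read)
-- (fueled structural recursion so the port evaluates; fuel = fts.length - e bounds the
-- iteration count and never runs out where the loop is entered)
def pyInnerA (fts : List Int) (span base : Int) : Nat → Nat → Nat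
  | 0, e => e
  | fuel + 1, e =>
    if e < fts.length ∧ fts.getD e 0 < base + span then
      pyInnerA fts span base fuel (e + 1)
    else e

-- outer 'while end < len(list_fts)' with start = end after each window; fuel bounds the
-- iteration count (a totality guard only: with fuel = len+1 it never runs out where the
-- Python terminates, i.e. whenever Pre_ holds)
def pyOuterA (fts : List Int) (span : Int) : Nat → Nat → List (List Int) → List (List Int)
  | 0, _, acc => acc
  | fuel + 1, start, acc =>
    if start < fts.length then
      let e := pyInnerA fts span (fts.getD start 0) (fts.length - start) start
      pyOuterA fts span fuel e (acc ++ [PySem.List.slice fts (some (start : Int)) (some (e : Int))])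
    else acc

def get_time_windows_py (list_fts : List Int) (time_span : Int) : List (List Int) :=
  pyOuterA list_fts time_span (list_fts.length + 1) 0 []

-- ===== PORT B =====
-- flat loop: 'for x in list_fts', current window flushed when x falls outside its span
def altGo (span : Int) : List Int → List (List Int) → List Int → List (List Int)
  | [], acc, cur => if cur = [] then acc else acc ++ [cur]
  | x :: rest, acc, cur =>
    match cur with
    | c0 :: _ =>
      if x < c0 + span then altGo span rest acc (cur ++ [x])
      else altGo span rest (acc ++ [cur]) [x]
    | [] => altGo span rest acc [x]

def get_time_windows_py_alt (list_fts : List Int) (time_span : Int) : List (List Int) :=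
  altGo time_span list_fts [] []

-- ===== PRECONDITION & SPEC =====
-- Pre_ excludes exactly the inputs on which A never returns: with a nonempty list and
-- time_span ≤ 0 the inner while never advances and A loops forever.
def Pre_get_time_windows_py (list_fts : List Int) (time_span : Int) : Prop :=
  list_fts = [] ∨ 0 < time_span
instance (list_fts : List Int) (time_span : Int) : Decidable (Pre_get_time_windows_py list_fts time_span) := by unfold Pre_get_time_windows_py; infer_instance

def pvWitness_get_time_windows_py : List Int × Int := ([902, 903, 904, 905, 910], 3)

def Spec_get_time_windows_py (list_fts : List Int) (time_span : Int) (out : List (List Int)) : Prop := out = get_time_windows_py_alt list_fts time_span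
instance (list_fts : List Int) (time_span : Int) (out : List (List Int)) : Decidable (Spec_get_time_windows_py list_fts time_span out) := by unfold Spec_get_time_windows_py; infer_instance

-- ===== CLAIM (what is proved, stated in full; the proofs are below) =====
def Claim_equal_get_time_windows_py : Prop := ∀ (list_fts : List Int) (time_span : Int), Dom_get_time_windows_py list_fts time_span → Pre_get_time_windows_py list_fts time_span → Spec_get_time_windows_py list_fts time_span (get_time_windows_py list_fts time_span)

-- ===== LEMMAS AND PROOFS =====

-- canonical window decomposition: the common meeting point of both ports
def pvWindows (span : Int) : List Int → List (List Int)
  | [] => []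
  | x :: rest =>
    (x :: rest.takeWhile (fun y => y < x + span)) ::
      pvWindows span (rest.dropWhile (fun y => y < x + span))
termination_by l => l.length
decreasing_by
  simp only [List.length_cons]
  exact Nat.lt_succ_of_le (rest.length_dropWhile_le _)

theorem take_len_takeWhile {α : Type} (p : α → Bool) (l : List α) :
    l.take (l.takeWhile p).length = l.takeWhile p := by
  induction l with
  | nil => simp
  | cons a t ih =>
    by_cases h : p a = true <;> simp [h, ih]

theorem drop_len_takeWhile {α : Type} (p : α → Bool) (l : List α) :
    l.drop (l.takeWhile p).length = l.dropWhile p := by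
  induction l with
  | nil => simp
  | cons a t ih =>
    by_cases h : p a = true <;> simp [h, ih]

theorem pyInnerA_eq (fts : List Int) (span base : Int) :
    ∀ (fuel e : Nat), fts.length ≤ e + fuel →
      pyInnerA fts span base fuel e
        = e + ((fts.drop e).takeWhile (fun y => y < base + span)).length := by
  intro fuel
  induction fuel with
  | zero =>
    intro e hf
    rw [pyInnerA, List.drop_eq_nil_of_le (by omega)]
    simp
  | succ n ihf =>
    intro e hf
    rw [pyInnerA]
    split
    · rename_i h
      obtain ⟨hlt, hv⟩ := h
      have hd : fts.drop e = fts[e] :: fts.drop (e + 1) := List.drop_eq_getElem_cons hlt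
      have hget : fts.getD e 0 = fts[e] := List.getD_eq_getElem fts 0 hlt
      rw [ihf (e + 1) (by omega)]
      rw [hd, List.takeWhile_cons]
      simp only [hget] at hv
      simp [hv]
      omega
    · rename_i h
      rcases Nat.lt_or_ge e fts.length with hlt | hge
      · -- then the value test failed
        have hget : fts.getD e 0 = fts[e] := List.getD_eq_getElem fts 0 hlt
        have hv : ¬ fts[e] < base + span := by
          intro hc; exact h ⟨hlt, by rw [hget]; exact hc⟩
        have hd : fts.drop e = fts[e] :: fts.drop (e + 1) := List.drop_eq_getElem_cons hlt
        rw [hd, List.takeWhile_cons]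
        simp [hv]
      · rw [List.drop_eq_nil_of_le hge]
        simp

theorem pyOuterA_eq (fts : List Int) (span : Int) (hspan : 0 < span) :
    ∀ (fuel start : Nat) (acc : List (List Int)),
      fts.length - start < fuel →
      pyOuterA fts span fuel start acc = acc ++ pvWindows span (fts.drop start) := by
  intro fuel
  induction fuel with
  | zero => intro start acc h; omega
  | succ n ih =>
    intro start acc h
    rw [pyOuterA]
    split
    · rename_i hlt
      have hd : fts.drop start = fts[start] :: fts.drop (start + 1) :=
        List.drop_eq_getElem_cons hlt
      have hget : fts.getD start 0 = fts[start] := List.getD_eq_getElem fts 0 hlt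
      set x := fts[start] with hx
      set t := ((fts.drop (start + 1)).takeWhile (fun y => y < x + span)).length with ht
      have hinner : pyInnerA fts span (fts.getD start 0) (fts.length - start) start = start + 1 + t := by
        rw [hget, pyInnerA_eq fts span x (fts.length - start) start (by omega),
          hd, List.takeWhile_cons]
        have : x < x + span := by omega
        simp [this]
        omega
      have hslice : PySem.List.slice fts (some ((start : Nat) : Int)) (some ((start + 1 + t : Nat) : Int))
          = x :: (fts.drop (start + 1)).takeWhile (fun y => y < x + span) := by
        rw [PySem.List.slice_natCast]
        have : start + 1 + t - start = 1 + t := by omega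
        rw [this, hd, Nat.add_comm 1 t, List.take_succ_cons, ht, take_len_takeWhile]
      have hdropped : fts.drop (start + 1 + t) = (fts.drop (start + 1)).dropWhile (fun y => y < x + span) := by
        rw [← drop_len_takeWhile (fun y => y < x + span) (fts.drop (start + 1))]
        rw [List.drop_drop]
      have hrec : fts.length - (start + 1 + t) < n := by
        have := List.length_drop (l := fts) (i := start + 1)
        omega
      rw [hinner, ih (start + 1 + t) _ hrec, hslice, hdropped]
      conv_rhs => rw [hd, pvWindows]
      simp
    · rename_i hge
      rw [List.drop_eq_nil_of_le (by omega), pvWindows]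
      simp

theorem altGo_eq (span : Int) :
    ∀ (rest : List Int) (acc : List (List Int)) (c0 : Int) (cs : List Int),
      altGo span rest acc (c0 :: cs) =
        acc ++ ((c0 :: cs) ++ rest.takeWhile (fun y => y < c0 + span)) ::
          pvWindows span (rest.dropWhile (fun y => y < c0 + span)) := by
  intro rest
  induction rest with
  | nil => intro acc c0 cs; simp [altGo, pvWindows]
  | cons x r ih =>
    intro acc c0 cs
    rw [altGo]
    by_cases hx : x < c0 + span
    · simp only [hx, if_pos, List.cons_append]
      rw [ih acc c0 (cs ++ [x]), List.takeWhile_cons, List.dropWhile_cons]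
      simp [hx]
    · simp only [hx, if_neg, not_false_iff]
      rw [ih (acc ++ [c0 :: cs]) x []]
      rw [List.takeWhile_cons, List.dropWhile_cons]
      have hpw : pvWindows span (x :: r) =
          (x :: r.takeWhile (fun y => y < x + span)) ::
            pvWindows span (r.dropWhile (fun y => y < x + span)) := by rw [pvWindows]
      simp [hx, hpw]

theorem alt_eq_windows (fts : List Int) (span : Int) :
    get_time_windows_py_alt fts span = pvWindows span fts := by
  cases fts with
  | nil => simp [get_time_windows_py_alt, altGo, pvWindows]
  | cons x rest =>
    rw [get_time_windows_py_alt, altGo, altGo_eq]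
    rw [pvWindows]
    simp

-- ===== VERDICT (by name: the statement is the Claim_ definition above) =====
theorem get_time_windows_py_spec : Claim_equal_get_time_windows_py := by
  intro fts span _ hpre
  unfold Spec_get_time_windows_py
  rcases hpre with hnil | hspan
  · subst hnil
    simp [get_time_windows_py, pyOuterA, get_time_windows_py_alt, altGo]
  · rw [get_time_windows_py, alt_eq_windows,
      pyOuterA_eq fts span hspan (fts.length + 1) 0 [] (by omega)]
    simp
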